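-- pv_equiv track=rewrite | github.com/pypi-data/pypi-mirror-385 | packages/semantic-copycat-src2id/semantic_copycat_src2id-1.3.1.tar.gz/semantic_copycat_src2id-1.3.1/src2id/integrations/manifest_parser.py | _is_official_npm_org
-- ===== SOURCE A (Python) =====
-- def _is_official_npm_org(url: str) -> bool:
--     """Check if NPM package is from an official organization."""
--     official_patterns = [
--         'github.com/nodejs/',
--         'github.com/npm/',
--         'github.com/microsoft/',
--         'github.com/google/',
--         'github.com/facebook/',
--         'github.com/angular/',
--         'github.com/reactjs/',
--     ]
--     return any(pattern in url.lower() for pattern in official_patterns)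
-- ===== SOURCE B (Python) =====
-- def _is_official_npm_org(url: str) -> bool:
--     """Check if NPM package is from an official organization."""
--     orgs = ('nodejs/', 'npm/', 'microsoft/', 'google/', 'facebook/', 'angular/', 'reactjs/')
--     u = url.lower()
--     for i in range(len(u)):
--         if u.startswith('github.com/', i) and u.startswith(orgs, i + 11):
--             return True
--     return False
-- ===== Notes on version B (the rewrite author's own statement) =====
-- stated objective: alternative
-- what changed: Replaces seven independent full-pattern substring searches over the lowered URL by a single left-to-right scan that, at each position, checks the shared host/prefix part once and then matches the org segment against a tuple via startswith.
import Mathlib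
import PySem

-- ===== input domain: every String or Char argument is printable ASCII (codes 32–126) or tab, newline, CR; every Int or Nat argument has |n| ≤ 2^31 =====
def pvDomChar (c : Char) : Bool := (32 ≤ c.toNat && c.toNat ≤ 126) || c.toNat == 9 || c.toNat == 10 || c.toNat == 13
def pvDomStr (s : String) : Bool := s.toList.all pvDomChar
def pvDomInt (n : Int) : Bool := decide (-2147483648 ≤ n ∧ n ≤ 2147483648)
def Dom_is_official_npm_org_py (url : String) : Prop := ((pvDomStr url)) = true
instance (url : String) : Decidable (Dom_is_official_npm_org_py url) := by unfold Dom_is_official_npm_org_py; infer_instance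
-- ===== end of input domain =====

-- B replaces seven independent substring searches by one left-to-right scan that
-- checks the shared 'github.com/' prefix once per position, then the org segment
-- (objective: alternative; same return value, no side effects).


-- ===== PORT A =====
def officialPatterns : List String :=
  ["github.com/nodejs/", "github.com/npm/", "github.com/microsoft/", "github.com/google/",
   "github.com/facebook/", "github.com/angular/", "github.com/reactjs/"]

def is_official_npm_org_py (url : String) : Bool :=
  officialPatterns.any (fun pattern => PySem.Str.isIn pattern (PySem.Str.lower url))

-- ===== PORT B =====
def altOrgs : List String :=
  ["nodejs/", "npm/", "microsoft/", "google/", "facebook/", "angular/", "reactjs/"]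

-- the for-loop over positions i of u, checking u.startswith('github.com/', i)
-- and u.startswith(orgs, i+11): recursion over the suffixes of u
def altScan : List Char → Bool
  | [] => false
  | c :: rest =>
    ((PySem.Chars.startswith (c :: rest) "github.com/".toList &&
        altOrgs.any (fun o => PySem.Chars.startswith ((c :: rest).drop 11) o.toList)))
    || altScan rest

def is_official_npm_org_py_alt (url : String) : Bool :=
  altScan (PySem.Str.lower url).toList

-- ===== PRECONDITION & SPEC =====
def Spec_is_official_npm_org_py (url : String) (out : Bool) : Prop := out = is_official_npm_org_py_alt url
instance (url : String) (out : Bool) : Decidable (Spec_is_official_npm_org_py url out) := by unfold Spec_is_official_npm_org_py; infer_instance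

-- ===== CLAIM (what is proved, stated in full; the proofs are below) =====
def Claim_equal_is_official_npm_org_py : Prop := ∀ (url : String), Dom_is_official_npm_org_py url → Spec_is_official_npm_org_py url (is_official_npm_org_py url)

-- ===== LEMMAS AND PROOFS =====

theorem append_prefix_iff (a b s : List Char) :
    (a ++ b) <+: s ↔ a <+: s ∧ b <+: s.drop a.length := by
  constructor
  · rintro ⟨t, rfl⟩
    refine ⟨⟨b ++ t, by simp⟩, ?_⟩
    rw [List.append_assoc, List.drop_left]
    exact ⟨t, rfl⟩
  · rintro ⟨⟨u, rfl⟩, hb⟩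
    rw [List.drop_left] at hb
    obtain ⟨t, rfl⟩ := hb
    exact ⟨t, by simp⟩

theorem altScan_iff (l : List Char) :
    altScan l = true ↔ ∃ o ∈ altOrgs, ("github.com/".toList ++ o.toList) <:+: l := by
  induction l with
  | nil =>
    simp only [altScan, Bool.false_eq_true, false_iff, not_exists]
    rintro o ⟨_, hinf⟩
    rw [List.infix_nil] at hinf
    have : "github.com/".toList = [] ∧ o.toList = [] := by
      simpa using List.append_eq_nil_iff.mp hinf
    simp at this
  | cons c rest ih =>
    have hlen : ("github.com/".toList).length = 11 := by decide
    constructor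
    · intro h
      simp only [altScan, Bool.or_eq_true, Bool.and_eq_true, List.any_eq_true] at h
      rcases h with ⟨hgh, o, ho, hor⟩ | h
      · refine ⟨o, ho, List.infix_cons_iff.mpr (Or.inl ?_)⟩
        rw [append_prefix_iff, hlen]
        exact ⟨(PySem.Chars.startswith_iff _ _).mp hgh, (PySem.Chars.startswith_iff _ _).mp hor⟩
      · obtain ⟨o, ho, hinf⟩ := ih.mp h
        exact ⟨o, ho, List.infix_cons_iff.mpr (Or.inr hinf)⟩
    · rintro ⟨o, ho, hinf⟩
      simp only [altScan, Bool.or_eq_true, Bool.and_eq_true, List.any_eq_true]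
      rcases List.infix_cons_iff.mp hinf with hp | hinf'
      · rw [append_prefix_iff, hlen] at hp
        exact Or.inl ⟨(PySem.Chars.startswith_iff _ _).mpr hp.1,
          o, ho, (PySem.Chars.startswith_iff _ _).mpr hp.2⟩
      · exact Or.inr (ih.mpr ⟨o, ho, hinf'⟩)

-- ===== VERDICT (by name: the statement is the Claim_ definition above) =====
theorem is_official_npm_org_py_spec : Claim_equal_is_official_npm_org_py := by
  intro url _
  show is_official_npm_org_py url = is_official_npm_org_py_alt url
  rw [Bool.eq_iff_iff]
  unfold is_official_npm_org_py is_official_npm_org_py_alt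
  rw [altScan_iff]
  simp only [List.any_eq_true, PySem.Str.isIn_iff_infix]
  constructor
  · rintro ⟨p, hp, hinf⟩
    fin_cases hp <;>
      [exact ⟨"nodejs/", by decide, hinf⟩; exact ⟨"npm/", by decide, hinf⟩;
       exact ⟨"microsoft/", by decide, hinf⟩; exact ⟨"google/", by decide, hinf⟩;
       exact ⟨"facebook/", by decide, hinf⟩; exact ⟨"angular/", by decide, hinf⟩;
       exact ⟨"reactjs/", by decide, hinf⟩]
  · rintro ⟨o, ho, hinf⟩
    fin_cases ho <;>
      [exact ⟨"github.com/nodejs/", by decide, hinf⟩; exact ⟨"github.com/npm/", by decide, hinf⟩;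
       exact ⟨"github.com/microsoft/", by decide, hinf⟩; exact ⟨"github.com/google/", by decide, hinf⟩;
       exact ⟨"github.com/facebook/", by decide, hinf⟩; exact ⟨"github.com/angular/", by decide, hinf⟩;
       exact ⟨"github.com/reactjs/", by decide, hinf⟩]
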